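-- pv_equiv track=rewrite | github.com/jinhyung-noh/algorithm-ps | BaekJoon/2447_별찍기10.py | printing
-- ===== SOURCE A (Python) =====
-- def printing(k: int, x: int, y: int):
--     def _trisect(k: int , x: int):
--         if 0 <= x < 3 ** (k-1):
--             return 0
--         elif 3 ** (k-1) <= x < 2 * 3 ** (k-1):
--             return 1
--         else:
--             return 2
--
--     # def _printing(k: int, x: int, y: int):
--     #     # base case 1
--     #     if x == 0 and y == 0:
--     #         return 1
--     #     # base case 2
--     #     if 3 * _trisect(k, x) + _trisect(k, y) == 4:
--     #         return 0
--
--     #     # recursive call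
--     #     return _printing(k-1, x % 3 ** (k-1), y % 3 **(k-1))
--
--     # if _printing(k, x, y):
--     #     return "*"
--     # else:
--     #     return " "
--
--     while k > 0:
--         if 3 * _trisect(k, x) + _trisect(k, y) == 4:
--             return " "
--         k -= 1
--         x %= 3 ** k
--         y %= 3 ** k
--     return "*"
-- ===== SOURCE B (Python) =====
-- def printing(k, x, y):
--     # Blank iff the middle-middle cell is hit at some level: test the top
--     # level by range comparison, then walk the remaining base-3 digits of the
--     # reduced (non-negative) coordinates least-significant-first, stopping as
--     # soon as either coordinate runs out of digits.
--     if k <= 0: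
--         return "*"
--     p = 3 ** (k - 1)
--     if p <= x < 2 * p and p <= y < 2 * p:
--         return " "
--     return _blank(x % p, y % p)
--
--
-- def _blank(x, y):
--     # x, y >= 0; star unless some base-3 digit position has a 1 in both.
--     if x == 0 or y == 0:
--         return "*"
--     if x % 3 == 1 and y % 3 == 1:
--         return " "
--     return _blank(x // 3, y // 3)
-- ===== Notes on version B (the rewrite author's own statement) =====
-- stated objective: faster
-- what changed: B replaces A's level-counting while loop (fresh bignum 3**k power and two full-width mods per level, most-significant-first trisect comparisons) with one top-level range test followed by a least-significant-first recursion that peels single base-3 digits with %3 // 3 and stops as soon as either coordinate reaches 0.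
import Mathlib
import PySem

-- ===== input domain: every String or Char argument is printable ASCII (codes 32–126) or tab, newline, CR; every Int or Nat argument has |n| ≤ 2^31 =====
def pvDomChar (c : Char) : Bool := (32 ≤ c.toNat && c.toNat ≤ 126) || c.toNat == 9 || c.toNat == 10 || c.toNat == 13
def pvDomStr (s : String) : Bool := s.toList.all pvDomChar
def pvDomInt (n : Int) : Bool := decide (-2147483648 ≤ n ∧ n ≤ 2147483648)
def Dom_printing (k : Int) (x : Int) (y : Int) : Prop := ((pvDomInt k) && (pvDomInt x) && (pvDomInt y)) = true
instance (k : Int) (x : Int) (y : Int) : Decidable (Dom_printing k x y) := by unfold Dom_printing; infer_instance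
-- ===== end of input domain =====

-- B replaces A's level-counting loop (a fresh 3**k power and two full-width mods per level)
-- with one top-level range test plus a least-significant-first recursion peeling single
-- base-3 digits and stopping when a coordinate reaches 0 (faster by a constant factor).

-- ===== PORT A =====
-- _trisect is only ever called with k ≥ 1 (inside the while loop), so (k-1).toNat is exact there.
def pvTrisect (k : Int) (x : Int) : Int :=
  if 0 ≤ x ∧ x < 3 ^ (k - 1).toNat then 0
  else if 3 ^ (k - 1).toNat ≤ x ∧ x < 2 * 3 ^ (k - 1).toNat then 1
  else 2

-- the while loop: runs max(k,0) times, the counter at each iteration is n+1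
def pvGo : Nat → Int → Int → String
  | 0, _, _ => "*"
  | n + 1, x, y =>
    if 3 * pvTrisect ((n : Int) + 1) x + pvTrisect ((n : Int) + 1) y = 4 then " "
    else pvGo n (PySem.Int.mod x (3 ^ n)) (PySem.Int.mod y (3 ^ n))

def printing (k : Int) (x : Int) (y : Int) : String := pvGo k.toNat x y

-- ===== PORT B =====
-- _blank is only ever called with non-negative ints (x % p, y % p with p > 0), so it is
-- ported over Nat: Python's % and // on non-negative ints are exactly Nat.mod / Nat.div.
def pvBlank (x y : Nat) : String :=
  if x = 0 ∨ y = 0 then "*"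
  else if x % 3 = 1 ∧ y % 3 = 1 then " "
  else pvBlank (x / 3) (y / 3)
termination_by x
decreasing_by exact Nat.div_lt_self (by omega) (by omega)

def printing_alt (k : Int) (x : Int) (y : Int) : String :=
  if k ≤ 0 then "*"
  else
    let p : Int := 3 ^ (k - 1).toNat
    if (p ≤ x ∧ x < 2 * p) ∧ (p ≤ y ∧ y < 2 * p) then " "
    else pvBlank (PySem.Int.mod x p).toNat (PySem.Int.mod y p).toNat

-- ===== PRECONDITION & SPEC =====
def Spec_printing (k : Int) (x : Int) (y : Int) (out : String) : Prop := out = printing_alt k x y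
instance (k : Int) (x : Int) (y : Int) (out : String) : Decidable (Spec_printing k x y out) := by unfold Spec_printing; infer_instance

-- ===== CLAIM (what is proved, stated in full; the proofs are below) =====
def Claim_equal_printing : Prop := ∀ (k : Int) (x : Int) (y : Int), Dom_printing k x y → Spec_printing k x y (printing k x y)

-- ===== LEMMAS AND PROOFS =====

lemma pv_any_congr {A : Type} (l : List A) (p q : A → Bool) (h : ∀ a ∈ l, p a = q a) :
    l.any p = l.any q := by
  induction l with
  | nil => rfl
  | cons a l ih =>
    simp only [List.any_cons, h a (List.mem_cons_self), ih (fun b hb => h b (List.mem_cons_of_mem a hb))]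

-- low base-3 digits are unchanged by taking the value mod 3^n
lemma pv_digit_mod (x : Int) (hx : 0 ≤ x) {i n : Nat} (h : i < n) :
    x % 3 ^ n / 3 ^ i % 3 = x / 3 ^ i % 3 := by
  obtain ⟨m, rfl⟩ := Int.eq_ofNat_of_zero_le hx
  have h3 : ∀ j : Nat, ((3 : Int) ^ j) = ((3 ^ j : Nat) : Int) := by intro j; push_cast; ring
  have hsplit : (3 : Nat) ^ n = 3 ^ i * 3 ^ (n - i) := by rw [← pow_add]; congr 1; omega
  have key : m % 3 ^ n / 3 ^ i % 3 = m / 3 ^ i % 3 := by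
    rw [hsplit, Nat.mod_mul_right_div_self]
    exact Nat.mod_mod_of_dvd _ (dvd_pow_self 3 (by omega))
  rw [h3 n, h3 i]
  exact_mod_cast key

-- an Int digit test on a non-negative value is the Nat digit test on its image
lemma pv_dig_bridge (z : Int) (hz : 0 ≤ z) (i : Nat) :
    (PySem.Int.mod (PySem.Int.floordiv z (3 ^ i)) 3 == 1) = (z.toNat / 3 ^ i % 3 == 1) := by
  rw [PySem.Int.floordiv_eq_ediv_of_pos (by positivity), PySem.Int.mod_eq_emod_of_pos (by norm_num)]
  obtain ⟨m, rfl⟩ := Int.eq_ofNat_of_zero_le hz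
  have hcast : ((m : Int)) / (3 : Int) ^ i % 3 = ((m / 3 ^ i % 3 : Nat) : Int) := by push_cast; ring
  rw [hcast, Int.toNat_natCast]
  by_cases h : m / 3 ^ i % 3 = 1
  · rw [h]; rfl
  · have h1 : (((m / 3 ^ i % 3 : Nat) : Int) == 1) = false := by
      simp only [beq_eq_false_iff_ne, ne_eq]
      exact_mod_cast h
    have h2 : ((m / 3 ^ i % 3 : Nat) == 1) = false := by
      simp only [beq_eq_false_iff_ne, ne_eq]
      exact h
    rw [h1, h2]

-- B's recursion on in-range coordinates: any (1,1) base-3 digit pair (Nat version)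
lemma pv_blank_eq (n : Nat) (x y : Nat) (hx : x < 3 ^ n) (hy : y < 3 ^ n) :
    pvBlank x y =
      if (List.range n).any (fun i => (x / 3 ^ i % 3 == 1) && (y / 3 ^ i % 3 == 1)) then " " else "*" := by
  induction n generalizing x y with
  | zero =>
    interval_cases x
    rw [pvBlank]
    simp
  | succ n ih =>
    rw [pvBlank]
    by_cases h0 : x = 0 ∨ y = 0
    · rw [if_pos h0, if_neg]
      simp only [List.any_eq_true, not_exists, not_and]
      intro i hi hdig
      rcases h0 with h0 | h0 <;> simp [h0] at hdig
    · rw [if_neg h0]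
      by_cases h1 : x % 3 = 1 ∧ y % 3 = 1
      · rw [if_pos h1, if_pos]
        simp only [List.any_eq_true]
        exact ⟨0, List.mem_range.2 (Nat.succ_pos n), by simp [h1.1, h1.2]⟩
      · rw [if_neg h1]
        have hx' : x / 3 < 3 ^ n := by
          rw [Nat.div_lt_iff_lt_mul (by norm_num)]
          calc x < 3 ^ (n + 1) := hx
          _ = 3 ^ n * 3 := by ring
        have hy' : y / 3 < 3 ^ n := by
          rw [Nat.div_lt_iff_lt_mul (by norm_num)]
          calc y < 3 ^ (n + 1) := hy
          _ = 3 ^ n * 3 := by ring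
        rw [ih _ _ hx' hy']
        have hshift : ∀ i ∈ List.range n,
            ((x / 3 / 3 ^ i % 3 == 1) && (y / 3 / 3 ^ i % 3 == 1)) =
            ((x / 3 ^ (i + 1) % 3 == 1) && (y / 3 ^ (i + 1) % 3 == 1)) := by
          intro i _
          rw [Nat.div_div_eq_div_mul, Nat.div_div_eq_div_mul, pow_succ, mul_comm 3 (3 ^ i)]
        have hc : (List.range (n + 1)).any (fun i => (x / 3 ^ i % 3 == 1) && (y / 3 ^ i % 3 == 1))
            = (List.range n).any (fun i => (x / 3 / 3 ^ i % 3 == 1) && (y / 3 / 3 ^ i % 3 == 1)) := by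
          rw [List.range_succ_eq_map, List.any_cons, List.any_map]
          have h0dig : ((x / 3 ^ 0 % 3 == 1) && (y / 3 ^ 0 % 3 == 1)) = false := by
            simp only [pow_zero, Nat.div_one, Bool.and_eq_false_iff, beq_eq_false_iff_ne, ne_eq]
            tauto
          rw [h0dig, Bool.false_or]
          exact pv_any_congr _ _ _ (fun i hi => by
            simp only [Function.comp]
            exact (hshift i hi).symm)
        rw [hc]

-- the quotient by 3^n of an in-range value is its top digit
lemma pv_ediv_eq (x q b : Int) (hb : 0 < b) (h1 : q * b ≤ x) (h2 : x < (q + 1) * b) :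
    x / b = q := by
  rw [← PySem.Int.floordiv_eq_ediv_of_pos hb]
  exact (PySem.Int.floordiv_eq_iff_of_pos hb).2 ⟨h1, h2⟩

-- loop characterisation on in-range coordinates: any (1,1) base-3 digit pair
lemma pv_go_eq (n : Nat) (x y : Int) (hx0 : 0 ≤ x) (hx : x < 3 ^ n) (hy0 : 0 ≤ y) (hy : y < 3 ^ n) :
    pvGo n x y =
      if (List.range n).any (fun i =>
          (PySem.Int.mod (PySem.Int.floordiv x (3 ^ i)) 3 == 1) &&
          (PySem.Int.mod (PySem.Int.floordiv y (3 ^ i)) 3 == 1)) then " " else "*" := by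
  induction n generalizing x y with
  | zero => simp [pvGo]
  | succ n ih =>
    have hp : (0 : Int) < 3 ^ n := by positivity
    have hmodx : PySem.Int.mod x (3 ^ n) = x % 3 ^ n := PySem.Int.mod_eq_emod_of_pos hp
    have hmody : PySem.Int.mod y (3 ^ n) = y % 3 ^ n := PySem.Int.mod_eq_emod_of_pos hp
    have hx0' : 0 ≤ x % 3 ^ n := Int.emod_nonneg x (by positivity)
    have hy0' : 0 ≤ y % 3 ^ n := Int.emod_nonneg y (by positivity)
    have hx' : x % 3 ^ n < 3 ^ n := Int.emod_lt_of_pos x hp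
    have hy' : y % 3 ^ n < 3 ^ n := Int.emod_lt_of_pos y hp
    have hdx : x / 3 ^ n % 3 = 1 ↔ (3 ^ n ≤ x ∧ x < 2 * 3 ^ n) := by
      constructor
      · intro h
        by_cases h1 : x < 3 ^ n
        · exfalso; rw [pv_ediv_eq x 0 (3 ^ n) hp (by omega) (by omega)] at h; omega
        · by_cases h2 : x < 2 * 3 ^ n
          · exact ⟨by omega, h2⟩
          · exfalso
            rw [pv_ediv_eq x 2 (3 ^ n) hp (by push_cast at hx ⊢; omega)
              (by push_cast at hx ⊢; ring_nf at hx ⊢; omega)] at h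
            omega
      · intro ⟨h1, h2⟩
        rw [pv_ediv_eq x 1 (3 ^ n) hp (by omega) (by omega)]
        decide
    have hdy : y / 3 ^ n % 3 = 1 ↔ (3 ^ n ≤ y ∧ y < 2 * 3 ^ n) := by
      constructor
      · intro h
        by_cases h1 : y < 3 ^ n
        · exfalso; rw [pv_ediv_eq y 0 (3 ^ n) hp (by omega) (by omega)] at h; omega
        · by_cases h2 : y < 2 * 3 ^ n
          · exact ⟨by omega, h2⟩
          · exfalso
            rw [pv_ediv_eq y 2 (3 ^ n) hp (by push_cast at hy ⊢; omega)
              (by push_cast at hy ⊢; ring_nf at hy ⊢; omega)] at h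
            omega
      · intro ⟨h1, h2⟩
        rw [pv_ediv_eq y 1 (3 ^ n) hp (by omega) (by omega)]
        decide
    have htri : (3 * pvTrisect ((n : Int) + 1) x + pvTrisect ((n : Int) + 1) y = 4) ↔
        ((3 ^ n ≤ x ∧ x < 2 * 3 ^ n) ∧ (3 ^ n ≤ y ∧ y < 2 * 3 ^ n)) := by
      have hk : (((n : Int) + 1) - 1).toNat = n := by omega
      unfold pvTrisect
      rw [hk]
      split_ifs <;> constructor <;> intro h <;> first | omega | (exfalso; omega) | tauto
    have hrange : ∀ z w : Int,
        ((List.range (n + 1)).any (fun i =>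
          (PySem.Int.mod (PySem.Int.floordiv z (3 ^ i)) 3 == 1) &&
          (PySem.Int.mod (PySem.Int.floordiv w (3 ^ i)) 3 == 1)) = true) ↔
        (((List.range n).any (fun i =>
          (PySem.Int.mod (PySem.Int.floordiv z (3 ^ i)) 3 == 1) &&
          (PySem.Int.mod (PySem.Int.floordiv w (3 ^ i)) 3 == 1)) = true) ∨
          (z / 3 ^ n % 3 = 1 ∧ w / 3 ^ n % 3 = 1)) := by
      intro z w
      rw [List.range_succ, List.any_append]
      simp [PySem.Int.floordiv_eq_ediv_of_pos (show (0:Int) < 3 ^ n by positivity), PySem.Int.mod_eq_emod_of_pos (show (0:Int) < 3 by norm_num)]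
    have hlow : ∀ i ∈ List.range n,
        ((PySem.Int.mod (PySem.Int.floordiv (x % 3 ^ n) (3 ^ i)) 3 == 1) &&
          (PySem.Int.mod (PySem.Int.floordiv (y % 3 ^ n) (3 ^ i)) 3 == 1)) =
        ((PySem.Int.mod (PySem.Int.floordiv x (3 ^ i)) 3 == 1) &&
          (PySem.Int.mod (PySem.Int.floordiv y (3 ^ i)) 3 == 1)) := by
      intro i hi
      rw [List.mem_range] at hi
      have h3i : (0 : Int) < 3 ^ i := by positivity
      simp only [PySem.Int.floordiv_eq_ediv_of_pos h3i,
        PySem.Int.mod_eq_emod_of_pos (show (0 : Int) < 3 by norm_num),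
        pv_digit_mod x hx0 hi, pv_digit_mod y hy0 hi]
    show pvGo (n + 1) x y = _
    rw [pvGo, hmodx, hmody]
    by_cases hmid : (3 ^ n ≤ x ∧ x < 2 * 3 ^ n) ∧ (3 ^ n ≤ y ∧ y < 2 * 3 ^ n)
    · rw [if_pos (htri.2 hmid)]
      have : ((List.range (n + 1)).any (fun i =>
          (PySem.Int.mod (PySem.Int.floordiv x (3 ^ i)) 3 == 1) &&
          (PySem.Int.mod (PySem.Int.floordiv y (3 ^ i)) 3 == 1)) = true) :=
        (hrange x y).2 (Or.inr ⟨hdx.2 hmid.1, hdy.2 hmid.2⟩)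
      rw [if_pos this]
    · rw [if_neg (fun h => hmid (htri.1 h))]
      rw [ih _ _ hx0' hx' hy0' hy']
      rw [pv_any_congr _ _ _ hlow]
      by_cases hlo : ((List.range n).any (fun i =>
          (PySem.Int.mod (PySem.Int.floordiv x (3 ^ i)) 3 == 1) &&
          (PySem.Int.mod (PySem.Int.floordiv y (3 ^ i)) 3 == 1)) = true)
      · rw [if_pos hlo, if_pos ((hrange x y).2 (Or.inl hlo))]
      · rw [if_neg hlo, if_neg]
        intro h
        rcases (hrange x y).1 h with h' | ⟨h1, h2⟩
        · exact hlo h'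
        · exact hmid ⟨hdx.1 h1, hdy.1 h2⟩

-- ===== VERDICT (by name: the statement is the Claim_ definition above) =====
theorem printing_spec : Claim_equal_printing := by
  intro k x y _
  unfold Spec_printing printing printing_alt
  by_cases hk : k ≤ 0
  · have : k.toNat = 0 := by omega
    rw [this, if_pos hk]
    rfl
  · rw [if_neg hk]
    set m := (k - 1).toNat with hm
    have hkt : k.toNat = m + 1 := by omega
    have hkc : (m : Int) + 1 = k := by omega
    have hp : (0 : Int) < 3 ^ m := by positivity
    rw [hkt]
    show pvGo (m + 1) x y = _
    rw [pvGo, hkc]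
    have htri : (3 * pvTrisect k x + pvTrisect k y = 4) ↔
        ((3 ^ m ≤ x ∧ x < 2 * 3 ^ m) ∧ (3 ^ m ≤ y ∧ y < 2 * 3 ^ m)) := by
      unfold pvTrisect
      rw [← hm]
      split_ifs <;> constructor <;> intro h <;> first | omega | (exfalso; omega) | tauto
    by_cases hmid : (3 ^ m ≤ x ∧ x < 2 * 3 ^ m) ∧ (3 ^ m ≤ y ∧ y < 2 * 3 ^ m)
    · rw [if_pos (htri.2 hmid)]
      simp only []
      rw [if_pos hmid]
    · rw [if_neg (fun h => hmid (htri.1 h))]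
      simp only []
      rw [if_neg hmid]
      have hmodx : PySem.Int.mod x (3 ^ m) = x % 3 ^ m := PySem.Int.mod_eq_emod_of_pos hp
      have hmody : PySem.Int.mod y (3 ^ m) = y % 3 ^ m := PySem.Int.mod_eq_emod_of_pos hp
      have hx0 : 0 ≤ x % 3 ^ m := Int.emod_nonneg x (by positivity)
      have hy0 : 0 ≤ y % 3 ^ m := Int.emod_nonneg y (by positivity)
      have hxlt : x % 3 ^ m < 3 ^ m := Int.emod_lt_of_pos x hp
      have hylt : y % 3 ^ m < 3 ^ m := Int.emod_lt_of_pos y hp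
      rw [hmodx, hmody, pv_go_eq m _ _ hx0 hxlt hy0 hylt]
      have hxn : (x % 3 ^ m).toNat < 3 ^ m := by
        have hcast : ((3 ^ m : Nat) : Int) = 3 ^ m := by push_cast; ring
        omega
      have hyn : (y % 3 ^ m).toNat < 3 ^ m := by
        have hcast : ((3 ^ m : Nat) : Int) = 3 ^ m := by push_cast; ring
        omega
      rw [pv_blank_eq m _ _ hxn hyn]
      rw [pv_any_congr _ _ _ (fun i _ => by
        rw [pv_dig_bridge _ hx0 i, pv_dig_bridge _ hy0 i])]
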